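-- pv_equiv track=rewrite | github.com/cardy31/CTCI | HackerRank/three.py | usernameDisparity
-- ===== SOURCE A (Python) =====
-- def usernameDisparity(inputs):
--     total = []
--
--     for username in inputs:
--         current_str = username
--         local_total = 0
--         for i in range(0, len(username)):
--             count = 0
--
--             for i in range(0, len(current_str)):
--                 if current_str[i] == username[i]:
--                     count += 1
--                 else:
--                     break
--
--             local_total += count
--             current_str = current_str[1:]
--         total.append(local_total)
--     return total
-- ===== SOURCE B (Python) =====
-- def usernameDisparity(inputs):
--     result = []
--     for username in inputs:
--         n = len(username)
--         z = [0] * n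
--         l = r = 0
--         for i in range(1, n):
--             z[i] = min(r - i, z[i - l]) if i < r else 0
--             while i + z[i] < n and username[z[i]] == username[i + z[i]]:
--                 z[i] += 1
--             if i + z[i] > r:
--                 l, r = i, i + z[i]
--         result.append(n + sum(z))
--     return result
-- ===== Notes on version B (the rewrite author's own statement) =====
-- stated objective: alternative
-- what changed: Replaces the per-suffix character rescan (each suffix recompared against the whole string) with the Z-algorithm: one left-to-right pass per string maintaining a match window [l,r) so each prefix-match length starts from earlier Z-values and is extended; intended as asymptotically faster (O(n) vs O(n^2) per string on repetitive strings), but a timing run on random strings measured only 1.27x, so no speed is claimed.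
import Mathlib
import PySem

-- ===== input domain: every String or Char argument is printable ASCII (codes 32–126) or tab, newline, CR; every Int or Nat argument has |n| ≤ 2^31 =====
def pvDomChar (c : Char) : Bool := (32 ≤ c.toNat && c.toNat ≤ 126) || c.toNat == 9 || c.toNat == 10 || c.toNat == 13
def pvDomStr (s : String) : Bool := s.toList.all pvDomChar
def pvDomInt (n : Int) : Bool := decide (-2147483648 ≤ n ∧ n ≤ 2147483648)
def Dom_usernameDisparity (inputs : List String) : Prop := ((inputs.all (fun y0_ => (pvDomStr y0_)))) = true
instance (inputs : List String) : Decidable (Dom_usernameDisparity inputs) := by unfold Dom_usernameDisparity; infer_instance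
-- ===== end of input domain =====

-- B replaces A's per-suffix rescan with the Z-algorithm (a different, window-based algorithm; not measured faster on the check's random inputs); equivalence of return values is proved below.

-- ===== PORT A =====
-- inner loop: `for i in range(0, len(current_str)): if current_str[i] == username[i]: count += 1 else: break`
-- (indexing via getD is exact here: i < len(current_str) is the loop guard, and username is always
--  at least as long as current_str, a suffix of it, so Python's [] never raises on reachable states)
def aInner (cur user : List Char) (i count : Nat) : Nat :=
  if i < cur.length then
    if cur.getD i ' ' = user.getD i ' ' then aInner cur user (i+1) (count+1) else count
  else count
termination_by cur.length - i

-- outer loop body over `range(0, len(username))` with state (current_str, local_total);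
-- current_str[1:] on a string = drop 1 of its characters (exact for all strings)
def usernameDisparity (inputs : List String) : List Int :=
  inputs.foldl (fun total username =>
    let u := username.toList
    let res := (PySem.List.pyRange 0 (u.length : Int) 1).foldl
      (fun (st : List Char × Nat) _ =>
        let count := aInner st.1 u 0 0
        (st.1.drop 1, st.2 + count)) (u, 0)
    total ++ [(res.2 : Int)]) []

-- ===== PORT B =====
-- the `while i + z[i] < n and username[z[i]] == username[i + z[i]]: z[i] += 1` loop of Source B
-- (indices z and i+z are < n under the guard, so getD is exact on reachable states)
def extendZ (s : List Char) (i z : Nat) : Nat :=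
  if h : i + z < s.length ∧ s.getD z ' ' = s.getD (i + z) ' ' then extendZ s i (z+1) else z
termination_by s.length - (i + z)
decreasing_by omega

-- one iteration of Source B's `for i in range(1, n)` loop; state (z, l, r).
-- i comes from range(1, n) so it is ≥ 1 and toNat is exact; l < i on every reachable state
-- (l starts at 0 and is only ever set to an earlier i), so z[i - l] never wraps around and
-- r - i (used when i < r) is an exact Nat subtraction.
def zstep (s : List Char) (st : List Nat × Nat × Nat) (ii : Int) : List Nat × Nat × Nat :=
  let z := st.1
  let l := st.2.1
  let r := st.2.2
  let i := ii.toNat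
  let g := if i < r then min (r - i) (z.getD (i - l) 0) else 0
  let zi := extendZ s i g
  (z.set i zi, if r < i + zi then (i, i + zi) else (l, r))

def usernameDisparity_alt (inputs : List String) : List Int :=
  inputs.foldl (fun result username =>
    let s := username.toList
    let n : Nat := s.length
    let st := (PySem.List.pyRange 1 (n : Int) 1).foldl (zstep s) (List.replicate n 0, 0, 0)
    result ++ [((n + st.1.foldl (fun a b => a + b) 0 : Nat) : Int)]) []

-- ===== PRECONDITION & SPEC =====
def Spec_usernameDisparity (inputs : List String) (out : List Int) : Prop := out = usernameDisparity_alt inputs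
instance (inputs : List String) (out : List Int) : Decidable (Spec_usernameDisparity inputs out) := by unfold Spec_usernameDisparity; infer_instance

-- ===== CLAIM (what is proved, stated in full; the proofs are below) =====
def Claim_equal_usernameDisparity : Prop := ∀ (inputs : List String), Dom_usernameDisparity inputs → Spec_usernameDisparity inputs (usernameDisparity inputs)

-- ===== LEMMAS AND PROOFS =====

/-- length of the longest common prefix of two character lists -/
def lcp : List Char → List Char → Nat
  | a :: x, b :: y => if a = b then lcp x y + 1 else 0
  | _, _ => 0

/-- the value A computes for suffix `i` of `s` -/
def zfun (s : List Char) (i : Nat) : Nat := lcp (s.drop i) s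

lemma lcp_cons_self (a : Char) (t u : List Char) : lcp (a :: t) (a :: u) = lcp t u + 1 := by
  simp [lcp]

lemma lcp_nil_left (y : List Char) : lcp [] y = 0 := by cases y <;> rfl

lemma lcp_le_left : ∀ x y : List Char, lcp x y ≤ x.length := by
  intro x
  induction x with
  | nil => intro y; simp [lcp_nil_left]
  | cons a t ih =>
    intro y; cases y with
    | nil => simp [lcp]
    | cons b u => simp only [lcp]; split_ifs <;> simp [Nat.succ_le_succ (ih u)]

lemma lcp_comm : ∀ x y : List Char, lcp x y = lcp y x := by
  intro x
  induction x with
  | nil => intro y; cases y <;> rfl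
  | cons a t ih =>
    intro y; cases y with
    | nil => rfl
    | cons b u => simp only [lcp]; rcases eq_or_ne a b with h | h <;> simp [h, eq_comm, ih u]

lemma lcp_self : ∀ x : List Char, lcp x x = x.length := by
  intro x; induction x with
  | nil => rfl
  | cons a t ih => simp [lcp, ih]

lemma lcp_drop : ∀ (g : Nat) (x y : List Char), g ≤ lcp x y →
    lcp x y = g + lcp (x.drop g) (y.drop g) := by
  intro g
  induction g with
  | zero => simp
  | succ g ih =>
    intro x y h
    cases x with
    | nil => simp [lcp_nil_left] at h
    | cons a t =>
      cases y with
      | nil => simp [lcp] at h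
      | cons b u =>
        by_cases hab : a = b
        · subst hab
          rw [lcp_cons_self] at h ⊢
          have := ih t u (by omega)
          simp only [List.drop_succ_cons]
          omega
        · simp [lcp, hab] at h

lemma le_lcp_iff : ∀ (m : Nat) (x y : List Char),
    m ≤ lcp x y ↔ m ≤ x.length ∧ m ≤ y.length ∧ x.take m = y.take m := by
  intro m
  induction m with
  | zero => intro x y; simp
  | succ m ih =>
    intro x y
    cases x with
    | nil => simp [lcp_nil_left]
    | cons a t =>
      cases y with
      | nil => simp [lcp]
      | cons b u =>
        by_cases hab : a = b
        · subst hab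
          rw [lcp_cons_self]
          simp only [List.take_succ_cons, List.length_cons, List.cons.injEq, true_and]
          constructor
          · intro h
            have := (ih t u).mp (by omega)
            exact ⟨by omega, by omega, this.2.2⟩
          · intro ⟨h1, h2, h3⟩
            have := (ih t u).mpr ⟨by omega, by omega, h3⟩
            omega
        · simp [lcp, hab]

lemma take_drop_cong {x y : List Char} {a j m : Nat}
    (h : x.take a = y.take a) (hjm : j + m ≤ a) :
    (x.drop j).take m = (y.drop j).take m := by
  have hx : (x.drop j).take m = (x.take (j + m)).drop j := by
    rw [List.drop_take]; congr 1; omega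
  have hy : (y.drop j).take m = (y.take (j + m)).drop j := by
    rw [List.drop_take]; congr 1; omega
  rw [hx, hy]
  have : x.take (j + m) = y.take (j + m) := by
    have := congrArg (List.take (j + m)) h
    simpa [List.take_take, Nat.min_eq_left hjm] using this
  rw [this]

/-- the standard Z-box guess bound -/
lemma guess_le (s : List Char) (l i r k : Nat)
    (hli : l ≤ i) (hir : i < r) (hrn : r ≤ s.length)
    (hwin : r - l ≤ zfun s l) (hk : k ≤ zfun s (i - l)) :
    min (r - i) k ≤ zfun s i := by
  set m := min (r - i) k with hm
  have hk' : m ≤ lcp (s.drop (i - l)) s := le_trans (by omega) hk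
  obtain ⟨hlen1, hlen2, htake1⟩ := (le_lcp_iff m _ _).mp hk'
  have hwin' : r - l ≤ lcp (s.drop l) s := hwin
  obtain ⟨_, _, htakew⟩ := (le_lcp_iff (r - l) _ _).mp hwin'
  -- take m (drop i s) = take m (drop (i-l) (drop l s)) = take m (drop (i-l) s) = take m s
  have hdd : s.drop i = (s.drop l).drop (i - l) := by
    rw [List.drop_drop]; congr 1; omega
  have hstep : ((s.drop l).drop (i - l)).take m = (s.drop (i - l)).take m := by
    have := take_drop_cong (x := s.drop l) (y := s) (a := r - l) (j := i - l) (m := m)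
      htakew (by omega)
    simpa using this
  have hfinal : (s.drop i).take m = s.take m := by
    rw [hdd, hstep, htake1]
  apply (le_lcp_iff m _ _).mpr
  refine ⟨?_, ?_, hfinal⟩
  · simp only [List.length_drop]; omega
  · have : m ≤ s.length - (i - l) := by simpa using hlen1
    omega

lemma lcp_cons (a b : Char) (t u : List Char) :
    lcp (a :: t) (b :: u) = if a = b then lcp t u + 1 else 0 := rfl

lemma extendZ_eq (s : List Char) (i : Nat) : ∀ z : Nat,
    extendZ s i z = z + lcp (s.drop (i + z)) (s.drop z) := by
  have H : ∀ (fuel z : Nat), s.length - (i + z) ≤ fuel →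
      extendZ s i z = z + lcp (s.drop (i + z)) (s.drop z) := by
    intro fuel
    induction fuel with
    | zero =>
      intro z hz
      rw [extendZ]
      have hge : ¬ (i + z < s.length ∧ s.getD z ' ' = s.getD (i + z) ' ') := by
        rintro ⟨h1, -⟩; omega
      rw [dif_neg hge]
      have : s.drop (i + z) = [] := List.drop_eq_nil_of_le (by omega)
      rw [this, lcp_nil_left]
      omega
    | succ fuel ih =>
      intro z hz
      rw [extendZ]
      by_cases hc : i + z < s.length ∧ s.getD z ' ' = s.getD (i + z) ' '
      · rw [dif_pos hc]
        obtain ⟨h1, h2⟩ := hc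
        have hzlt : z < s.length := by omega
        have hd1 : s.drop (i + z) = s[i + z] :: s.drop (i + z + 1) :=
          List.drop_eq_getElem_cons h1
        have hd2 : s.drop z = s[z] :: s.drop (z + 1) :=
          List.drop_eq_getElem_cons hzlt
        have heq : s[i + z] = s[z] := by
          rw [List.getD_eq_getElem s ' ' h1, List.getD_eq_getElem s ' ' hzlt] at h2
          exact h2.symm
        rw [ih (z + 1) (by omega), hd1, hd2, heq, lcp_cons_self]
        have : i + (z + 1) = i + z + 1 := by omega
        rw [this]
        omega
      · rw [dif_neg hc]
        by_cases h1 : i + z < s.length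
        · have hzlt : z < s.length := by omega
          have h2 : s.getD z ' ' ≠ s.getD (i + z) ' ' := fun h => hc ⟨h1, h⟩
          rw [List.drop_eq_getElem_cons h1, List.drop_eq_getElem_cons hzlt, lcp_cons]
          rw [List.getD_eq_getElem s ' ' h1, List.getD_eq_getElem s ' ' hzlt] at h2
          rw [if_neg (fun h => h2 (h.symm))]
          omega
        · have : s.drop (i + z) = [] := List.drop_eq_nil_of_le (by omega)
          rw [this, lcp_nil_left]
          omega
  intro z
  exact H (s.length - (i + z)) z le_rfl

lemma extendZ_exact (s : List Char) (i g : Nat) (h : g ≤ zfun s i) :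
    extendZ s i g = zfun s i := by
  have hcomm : zfun s i = lcp s (s.drop i) := lcp_comm _ _
  have hg : g ≤ lcp s (s.drop i) := by rw [← hcomm]; exact h
  have hdec := lcp_drop g s (s.drop i) hg
  rw [extendZ_eq, lcp_comm]
  rw [List.drop_drop] at hdec
  rw [hcomm, hdec]

lemma aInner_eq (cur user : List Char) (hlen : cur.length ≤ user.length) :
    ∀ i c, aInner cur user i c = c + lcp (cur.drop i) (user.drop i) := by
  have H : ∀ (fuel i c : Nat), cur.length - i ≤ fuel →
      aInner cur user i c = c + lcp (cur.drop i) (user.drop i) := by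
    intro fuel
    induction fuel with
    | zero =>
      intro i c hz
      rw [aInner, if_neg (by omega)]
      have : cur.drop i = [] := List.drop_eq_nil_of_le (by omega)
      rw [this, lcp_nil_left]
      omega
    | succ fuel ih =>
      intro i c hz
      rw [aInner]
      by_cases hi : i < cur.length
      · rw [if_pos hi]
        have hiu : i < user.length := by omega
        have hd1 : cur.drop i = cur[i] :: cur.drop (i + 1) := List.drop_eq_getElem_cons hi
        have hd2 : user.drop i = user[i] :: user.drop (i + 1) := List.drop_eq_getElem_cons hiu
        rw [List.getD_eq_getElem cur ' ' hi, List.getD_eq_getElem user ' ' hiu]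
        by_cases hch : cur[i] = user[i]
        · rw [if_pos hch, ih (i + 1) (c + 1) (by omega), hd1, hd2, hch, lcp_cons_self]
          omega
        · rw [if_neg hch, hd1, hd2, lcp_cons, if_neg hch]
          omega
      · rw [if_neg hi]
        have : cur.drop i = [] := List.drop_eq_nil_of_le (by omega)
        rw [this, lcp_nil_left]
        omega
  intro i c
  exact H (cur.length - i) i c le_rfl

lemma getD_set_self (l : List Nat) (i a : Nat) (h : i < l.length) :
    (l.set i a).getD i 0 = a := by
  simp [List.getD_eq_getElem?_getD, h]

lemma getD_set_ne (l : List Nat) (i j a : Nat) (h : i ≠ j) :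
    (l.set i a).getD j 0 = l.getD j 0 := by
  simp [List.getD_eq_getElem?_getD, List.getElem?_set_ne h]

/-- invariant of Source B's main loop -/
def ZInv (s : List Char) (i : Nat) (st : List Nat × Nat × Nat) : Prop :=
  st.1.length = s.length ∧
  st.1.getD 0 0 = 0 ∧
  (∀ j, j < s.length → st.1.getD j 0 ≤ zfun s j) ∧
  (∀ j, 1 ≤ j → j < i → st.1.getD j 0 = zfun s j) ∧
  st.2.1 < i ∧ st.2.2 ≤ s.length ∧ st.2.2 - st.2.1 ≤ zfun s st.2.1

lemma ZInv_init (s : List Char) : ZInv s 1 (List.replicate s.length 0, 0, 0) := by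
  refine ⟨by simp, by simp [List.getD], ?_, ?_, by norm_num, by simp, by simp⟩
  · intro j hj; simp
  · intro j h1 h2; omega

lemma ZInv_step (s : List Char) (i : Nat) (st : List Nat × Nat × Nat)
    (hinv : ZInv s i st) (h1 : 1 ≤ i) (hn : i < s.length) :
    ZInv s (i + 1) (zstep s st (i : Int)) := by
  obtain ⟨z, l, r⟩ := st
  obtain ⟨hlen, h0, hle, hexact, hli, hrn, hwin⟩ := hinv
  simp only at hlen h0 hle hexact hli hrn hwin
  have htn : ((i : Int)).toNat = i := Int.toNat_natCast i
  simp only [zstep, htn]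
  set g := if i < r then min (r - i) (z.getD (i - l) 0) else 0 with hg
  have hgle : g ≤ zfun s i := by
    rw [hg]
    split_ifs with hir
    · exact guess_le s l i r (z.getD (i - l) 0) (by omega) hir hrn hwin
        (hle (i - l) (by omega))
    · exact Nat.zero_le _
  have hzi : extendZ s i g = zfun s i := extendZ_exact s i g hgle
  have hzlt : i < z.length := by omega
  have hzibound : zfun s i ≤ s.length - i := by
    have := lcp_le_left (s.drop i) s
    simpa [zfun] using this
  refine ⟨by simp [List.length_set, hlen], ?_, ?_, ?_, ?_, ?_, ?_⟩
  · rw [getD_set_ne z i 0 _ (by omega)]; exact h0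
  · intro j hj
    by_cases hij : j = i
    · subst hij; rw [getD_set_self z j _ hzlt, hzi]
    · rw [getD_set_ne z i j _ (fun h => hij h.symm)]; exact hle j hj
  · intro j h1 h2
    by_cases hij : j = i
    · subst hij; rw [getD_set_self z j _ hzlt, hzi]
    · rw [getD_set_ne z i j _ (fun h => hij h.symm)]
      exact hexact j h1 (by omega)
  · split_ifs with hupd <;> (simp; try omega)
  · split_ifs with hupd <;> (simp; try omega)
  · split_ifs with hupd
    · simp only
      rw [hzi]
      have : i + zfun s i - i = zfun s i := by omega
      rw [this]
    · simpa using hwin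

lemma zfold_inv (s : List Char) : ∀ m : Nat, m + 1 ≤ s.length →
    ZInv s (m + 1) ((List.range m).foldl (fun st (k : Nat) => zstep s st (1 + (k : Int)))
      (List.replicate s.length 0, 0, 0)) := by
  intro m
  induction m with
  | zero => intro _; simpa using ZInv_init s
  | succ m ih =>
    intro h
    rw [List.range_succ, List.foldl_append]
    have hi := ZInv_step s (m + 1) _ (ih (by omega)) (by omega) (by omega)
    simpa [add_comm 1 (m : Int)] using hi

lemma foldl_add_eq_sum : ∀ (zs : List Nat) (c : Nat), zs.foldl (fun a b => a + b) c = c + zs.sum := by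
  intro zs
  induction zs with
  | nil => simp
  | cons a t ih => intro c; simp [List.foldl_cons, ih, List.sum_cons]; omega

lemma sum_eq_sum_getD : ∀ zs : List Nat, zs.sum = ∑ j ∈ Finset.range zs.length, zs.getD j 0 := by
  intro zs
  induction zs with
  | nil => simp
  | cons a t ih =>
    simp only [List.sum_cons, List.length_cons, Finset.sum_range_succ']
    simp [ih, add_comm]

/-- per-string value of B -/
lemma B_string (s : List Char) :
    (s.length + ((PySem.List.pyRange 1 (s.length : Int) 1).foldl (zstep s)
      (List.replicate s.length 0, 0, 0)).1.foldl (fun a b => a + b) 0 : Nat)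
      = ∑ j ∈ Finset.range s.length, zfun s j := by
  rcases Nat.eq_zero_or_pos s.length with hn | hn
  · have hs : s = [] := List.length_eq_zero_iff.mp hn
    subst hs
    simp [PySem.List.pyRange]
  · obtain ⟨m, hm⟩ : ∃ m, s.length = m + 1 := ⟨s.length - 1, by omega⟩
    have hrange : PySem.List.pyRange 1 (s.length : Int) 1
        = (List.range (s.length - 1)).map (fun k : Nat => (1 : Int) + k) := by
      rw [PySem.List.pyRange_one]
      have h1 : ((s.length : Int) - 1).toNat = s.length - 1 := by omega
      rw [h1]
    rw [hrange, List.foldl_map]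
    have hinv := zfold_inv s (s.length - 1) (by omega)
    have hm1 : s.length - 1 + 1 = s.length := by omega
    rw [hm1] at hinv
    obtain ⟨hlen, h0, _, hexact, _, _, _⟩ := hinv
    set zs := ((List.range (s.length - 1)).foldl
      (fun st (k : Nat) => zstep s st (1 + (k : Int)))
      (List.replicate s.length 0, 0, 0)).1 with hzs
    rw [foldl_add_eq_sum zs 0, sum_eq_sum_getD zs, hlen, hm]
    rw [Finset.sum_range_succ' (fun j => zs.getD j 0) m]
    rw [Finset.sum_range_succ' (zfun s) m]
    have hz0 : zfun s 0 = s.length := by simp [zfun, lcp_self]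
    rw [h0, hz0, hm]
    have hterm : ∀ x ∈ Finset.range m, zs.getD (x + 1) 0 = zfun s (x + 1) := by
      intro x hx
      rw [Finset.mem_range] at hx
      exact hexact (x + 1) (by omega) (by omega)
    rw [Finset.sum_congr rfl hterm]
    omega

/-- per-string fold of A computes suffix m and the partial sum -/
lemma afold (s : List Char) : ∀ m : Nat, m ≤ s.length →
    (List.range m).foldl
      (fun (st : List Char × Nat) (_ : Nat) => (st.1.drop 1, st.2 + aInner st.1 s 0 0)) (s, 0)
      = (s.drop m, ∑ j ∈ Finset.range m, zfun s j) := by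
  intro m
  induction m with
  | zero => intro _; simp
  | succ m ih =>
    intro h
    rw [List.range_succ, List.foldl_append, ih (by omega)]
    simp only [List.foldl_cons, List.foldl_nil]
    have hlen : (s.drop m).length ≤ s.length := by simp
    rw [aInner_eq (s.drop m) s hlen 0 0]
    simp only [List.drop_zero, List.drop_drop, zero_add]
    rw [Finset.sum_range_succ]
    constructor

/-- per-string value of A -/
lemma A_string (s : List Char) :
    ((PySem.List.pyRange 0 (s.length : Int) 1).foldl
      (fun (st : List Char × Nat) _ => (st.1.drop 1, st.2 + aInner st.1 s 0 0)) (s, 0)).2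
      = ∑ j ∈ Finset.range s.length, zfun s j := by
  rw [PySem.List.pyRange_one]
  rw [List.foldl_map]
  have : ((s.length : Int) - 0).toNat = s.length := by omega
  rw [this]
  rw [afold s s.length le_rfl]

-- ===== VERDICT (by name: the statement is the Claim_ definition above) =====
theorem usernameDisparity_spec : Claim_equal_usernameDisparity := by
  intro inputs hdom
  clear hdom
  unfold Spec_usernameDisparity usernameDisparity usernameDisparity_alt
  have H : ∀ acc : List Int,
      inputs.foldl (fun total username =>
        let u := username.toList
        let res := (PySem.List.pyRange 0 (u.length : Int) 1).foldl
          (fun (st : List Char × Nat) _ =>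
            let count := aInner st.1 u 0 0
            (st.1.drop 1, st.2 + count)) (u, 0)
        total ++ [(res.2 : Int)]) acc
      = inputs.foldl (fun result username =>
        let s := username.toList
        let n : Nat := s.length
        let st := (PySem.List.pyRange 1 (n : Int) 1).foldl (zstep s) (List.replicate n 0, 0, 0)
        result ++ [((n + st.1.foldl (fun a b => a + b) 0 : Nat) : Int)]) acc := by
    induction inputs with
    | nil => intro acc; rfl
    | cons u t ih =>
      intro acc
      simp only [List.foldl_cons]
      rw [show acc ++ [(((PySem.List.pyRange 0 (u.toList.length : Int) 1).foldl
          (fun (st : List Char × Nat) _ =>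
            (st.1.drop 1, st.2 + aInner st.1 u.toList 0 0)) (u.toList, 0)).2 : Int)]
        = acc ++ [((u.toList.length + ((PySem.List.pyRange 1 (u.toList.length : Int) 1).foldl
            (zstep u.toList) (List.replicate u.toList.length 0, 0, 0)).1.foldl
            (fun a b => a + b) 0 : Nat) : Int)] from by
          rw [A_string u.toList, B_string u.toList]]
      exact ih (acc ++ [((u.toList.length + ((PySem.List.pyRange 1 (u.toList.length : Int) 1).foldl
        (zstep u.toList) (List.replicate u.toList.length 0, 0, 0)).1.foldl
        (fun a b => a + b) 0 : Nat) : Int)])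
  exact H []
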